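-- pv_equiv track=rewrite | github.com/greyliedtke/PyExplore | Canvix/Development/Simulate/sine_wave.py | zoom_bound
-- ===== SOURCE A (Python) =====
-- def zoom_bound(x,y, w):
--     xa = []
--     ya = []
--     wr = list(range(int(-w),int(w+1)))
--
--     for xs in wr:
--         for ys in wr:
--             xa.append(x+xs)
--             ya.append(y+ys)
--     return xa, ya
-- ===== SOURCE B (Python) =====
-- def zoom_bound(x, y, w):
--     lo = int(-w)
--     n = int(w + 1) - lo
--     if n <= 0:
--         return [], []
--     m = n * n
--     xa = [x + lo + k // n for k in range(m)]
--     ya = [y + lo + k % n for k in range(m)]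
--     return xa, ya
-- ===== Notes on version B (the rewrite author's own statement) =====
-- stated objective: alternative
-- what changed: Replaces the nested iteration over a materialized offset list with a single flat index space 0..n^2-1 decoded by divmod: each output element is computed directly from its flat index via k//n and k%n, no offset list and no nested loops.
import Mathlib
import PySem

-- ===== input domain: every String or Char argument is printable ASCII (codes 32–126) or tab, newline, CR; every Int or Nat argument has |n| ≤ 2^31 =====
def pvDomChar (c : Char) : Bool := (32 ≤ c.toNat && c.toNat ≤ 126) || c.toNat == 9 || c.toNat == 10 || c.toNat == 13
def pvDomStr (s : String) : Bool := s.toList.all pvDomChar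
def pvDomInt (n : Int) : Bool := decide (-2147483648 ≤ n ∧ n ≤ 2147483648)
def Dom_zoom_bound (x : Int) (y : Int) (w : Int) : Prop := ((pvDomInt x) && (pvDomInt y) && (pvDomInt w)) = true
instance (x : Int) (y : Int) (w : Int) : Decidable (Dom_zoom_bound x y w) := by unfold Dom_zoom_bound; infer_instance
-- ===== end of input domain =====

-- B replaces A's nested loops over a materialized offset list by a single flat index space 0..n^2-1 decoded with divmod (objective: alternative).


-- ===== PORT A =====
-- nested double loop appending one element per inner step
def zoom_bound (x : Int) (y : Int) (w : Int) : List Int × List Int :=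
  let wr := PySem.List.pyRange (-w) (w + 1) 1
  wr.foldl (fun (p : List Int × List Int) xs =>
    wr.foldl (fun (q : List Int × List Int) ys => (q.1 ++ [x + xs], q.2 ++ [y + ys])) p)
    ([], [])

-- ===== PORT B =====
-- one flat index pass: element k of the n^2-sized output is decoded as (k // n, k % n)
def zoom_bound_alt (x : Int) (y : Int) (w : Int) : List Int × List Int :=
  let lo := -w
  let n := (w + 1) - lo
  if n ≤ 0 then ([], [])
  else
    let ks := PySem.List.pyRange 0 (n * n) 1
    (ks.map (fun k => x + lo + PySem.Int.floordiv k n),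
     ks.map (fun k => y + lo + PySem.Int.mod k n))

-- ===== PRECONDITION & SPEC =====
def Spec_zoom_bound (x : Int) (y : Int) (w : Int) (out : List Int × List Int) : Prop := out = zoom_bound_alt x y w
instance (x : Int) (y : Int) (w : Int) (out : List Int × List Int) : Decidable (Spec_zoom_bound x y w out) := by unfold Spec_zoom_bound; infer_instance

-- ===== CLAIM (what is proved, stated in full; the proofs are below) =====
def Claim_equal_zoom_bound : Prop := ∀ (x : Int) (y : Int) (w : Int), Dom_zoom_bound x y w → Spec_zoom_bound x y w (zoom_bound x y w)

-- ===== LEMMAS AND PROOFS =====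

-- A's inner loop over l appends a constant block to .1 and the shifted column to .2
theorem zb_inner (y a : Int) (l : List Int) (p : List Int × List Int) :
    l.foldl (fun (q : List Int × List Int) ys => (q.1 ++ [a], q.2 ++ [y + ys])) p
      = (p.1 ++ List.replicate l.length a, p.2 ++ l.map (fun ys => y + ys)) := by
  induction l generalizing p with
  | nil => simp
  | cons h t ih =>
      simp [List.foldl_cons, ih, List.replicate_succ]

-- A's outer loop over l as two flatMaps (with the inner list wr fixed)
theorem zb_outer (x y : Int) (wr l : List Int) (p : List Int × List Int) :
    l.foldl (fun (p : List Int × List Int) xs =>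
        wr.foldl (fun (q : List Int × List Int) ys => (q.1 ++ [x + xs], q.2 ++ [y + ys])) p) p
      = (p.1 ++ l.flatMap (fun xs => List.replicate wr.length (x + xs)),
         p.2 ++ l.flatMap (fun _ => wr.map (fun ys => y + ys))) := by
  induction l generalizing p with
  | nil => simp
  | cons h t ih =>
      rw [List.foldl_cons, zb_inner, ih]
      simp

-- a map over the flat index space 0..m*n-1 is the flatMap of its rows
theorem zb_range_mul {α : Type} (m n : Nat) (f : Nat → α) :
    (List.range (m * n)).map f
      = (List.range m).flatMap (fun i => (List.range n).map (fun j => f (i * n + j))) := by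
  induction m with
  | zero => simp
  | succ m ih =>
      rw [Nat.succ_mul, List.range_add, List.map_append, ih, List.range_succ,
        List.flatMap_append]
      simp [Function.comp_def]

-- ===== VERDICT (by name: the statement is the Claim_ definition above) =====
theorem zoom_bound_spec : Claim_equal_zoom_bound := by
  intro x y w _
  show zoom_bound x y w = zoom_bound_alt x y w
  simp only [zoom_bound, zoom_bound_alt]
  by_cases hn : (w + 1) - (-w) ≤ 0
  · rw [if_pos hn, PySem.List.pyRange_one_eq_nil (by omega : w + 1 ≤ -w)]
    simp
  · rw [if_neg hn, zb_outer]
    obtain ⟨N, hN⟩ : ∃ N : Nat, w + 1 - -w = (N : Int) := ⟨(w + 1 - -w).toNat, by omega⟩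
    have hNpos : 0 < N := by omega
    rw [hN]
    rw [PySem.List.pyRange_one, PySem.List.pyRange_one]
    have h1 : (w + 1 - -w).toNat = N := by omega
    have h2 : ((N : Int) * (N : Int) - 0).toNat = N * N := by
      rw [sub_zero]; exact_mod_cast Int.toNat_natCast (N * N)
    rw [h1, h2]
    simp only [Prod.mk.injEq, List.nil_append]
    constructor
    · rw [List.length_map, List.length_range, List.flatMap_map, List.map_map, zb_range_mul]
      refine List.flatMap_congr (fun i hi => ?_)
      rw [List.mem_range] at hi
      symm
      trans (List.map (fun _ : Nat => x + (-w + (i : Int))) (List.range N))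
      · refine List.map_congr_left (fun j hj => ?_)
        rw [List.mem_range] at hj
        have hdiv : (i * N + j) / N = i := by
          rw [Nat.mul_comm i N, Nat.mul_add_div hNpos, Nat.div_eq_of_lt hj, Nat.add_zero]
        simp only [Function.comp_apply, zero_add, PySem.Int.floordiv_natCast, hdiv]
        ring
      · simp
    · rw [List.flatMap_map, List.map_map, List.map_map, zb_range_mul]
      refine List.flatMap_congr (fun i hi => ?_)
      rw [List.mem_range] at hi
      symm
      refine List.map_congr_left (fun j hj => ?_)
      rw [List.mem_range] at hj
      have hmod : (i * N + j) % N = j := by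
        rw [Nat.mul_comm i N, Nat.mul_add_mod, Nat.mod_eq_of_lt hj]
      simp only [Function.comp_apply, zero_add, PySem.Int.mod_natCast, hmod]
      ring
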